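-- pv_equiv track=rewrite | github.com/lawrencetheabhorrence/Data-Analysis-2020 | hy-data-analysis-with-python-2020/part01-e13_reverse_dictionary/src/reverse_dictionary.py | reverse_dictionary
-- ===== SOURCE A (Python) =====
-- def reverse_dictionary(d):
--     d_c = d.copy()
--     out = []
--     for x in d_c.values():
--       for y in x: out.extend(x)
--     out = set(out)
--     out = dict.fromkeys(out, [])
--
--     for key, val in d_c.items():
--       new_val = []
--       for x in val:
--         new_val.extend(out[x])
--         if not (key in out[x]): new_val.append(key)
--         out.update({x: new_val})
--         new_val = []
--
--     return out
-- ===== SOURCE B (Python) =====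
-- def reverse_dictionary(d):
--     # element-major inversion: collect distinct elements once, then for each
--     # element re-scan d.items() collecting the keys whose value-list contains it
--     seen = set()
--     order = []
--     for val in d.values():
--         for x in val:
--             if x not in seen:
--                 seen.add(x)
--                 order.append(x)
--     return {x: [key for key, val in d.items() if x in val] for x in order}
-- ===== Notes on version B (the rewrite author's own statement) =====
-- stated objective: alternative
-- what changed: Replaces A's quadratic value-list blow-up (extending out by x once per element of x, then set-deduping) and incremental key-by-key dict rebuilding with an element-major strategy: one pass collects the distinct elements in first-occurrence order, then each element's key list is produced directly by one scan of d.items() with a membership test, so no dict of partial lists is ever mutated.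
import Mathlib
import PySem

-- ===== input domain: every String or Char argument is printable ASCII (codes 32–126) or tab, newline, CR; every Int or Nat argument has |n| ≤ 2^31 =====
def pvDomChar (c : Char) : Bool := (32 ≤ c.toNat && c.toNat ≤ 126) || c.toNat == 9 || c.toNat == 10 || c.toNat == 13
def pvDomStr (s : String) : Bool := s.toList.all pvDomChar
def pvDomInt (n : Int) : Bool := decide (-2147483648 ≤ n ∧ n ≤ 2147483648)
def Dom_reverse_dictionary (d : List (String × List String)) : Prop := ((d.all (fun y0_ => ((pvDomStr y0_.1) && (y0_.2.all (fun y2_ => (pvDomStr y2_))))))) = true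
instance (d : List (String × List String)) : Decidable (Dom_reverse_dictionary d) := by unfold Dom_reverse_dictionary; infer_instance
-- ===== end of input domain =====

-- B inverts the dict element-major (one scan of d.items() per distinct element) instead of
-- A's quadratic value-list blow-up plus incremental dict mutation; return values agree as
-- dicts (association lists); Python A's returned key order is set/hash order, which dict
-- comparison ignores — the ports fix first-occurrence order for it.

-- ===== PORT A =====
def reverse_dictionary (d : List (String × List String)) : List (String × List String) :=
  let dc := PySem.Dict.ofList d                       -- d_c = d.copy()
  -- for x in d_c.values(): for y in x: out.extend(x)
  let out0 : List String :=
    dc.values.foldl (fun acc x => x.foldl (fun a _y => a ++ x) acc) []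
  let s : PySem.Set String := PySem.Set.ofList out0   -- out = set(out)
  -- out = dict.fromkeys(out, [])
  let out1 : PySem.Dict String (List String) :=
    s.foldl (fun dd x => dd.insert x ([] : List String)) PySem.Dict.empty
  -- for key, val in d_c.items(): for x in val: new_val = out[x]-copy (+ key if absent); out[x] = new_val
  -- out[x] never raises here (every x of a value list is a key of out), so getD is exact
  let out2 : PySem.Dict String (List String) :=
    dc.items.foldl (fun dd kv =>
      kv.2.foldl (fun dd x =>
        dd.insert x (dd.getD x [] ++ (if kv.1 ∈ dd.getD x [] then [] else [kv.1]))) dd) out1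
  out2.items

-- ===== PORT B =====
def reverse_dictionary_alt (d : List (String × List String)) : List (String × List String) :=
  let dc := PySem.Dict.ofList d
  -- seen/order: distinct elements in first-occurrence order (a Python set + order list)
  let order : PySem.Set String :=
    dc.values.foldl (fun s val => val.foldl (fun s x => PySem.Set.add s x) s) PySem.Set.empty
  -- {x: [key for key, val in d.items() if x in val] for x in order}
  order.map (fun x => (x, (dc.items.filter (fun kv => decide (x ∈ kv.2))).map (·.1)))

-- ===== PRECONDITION & SPEC =====
def Spec_reverse_dictionary (d : List (String × List String)) (out : List (String × List String)) : Prop := out = reverse_dictionary_alt d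
instance (d : List (String × List String)) (out : List (String × List String)) : Decidable (Spec_reverse_dictionary d out) := by unfold Spec_reverse_dictionary; infer_instance

-- ===== CLAIM (what is proved, stated in full; the proofs are below) =====
def Claim_equal_reverse_dictionary : Prop := ∀ (d : List (String × List String)), Dom_reverse_dictionary d → Spec_reverse_dictionary d (reverse_dictionary d)

-- ===== LEMMAS AND PROOFS =====

-- the inner 'for y in x: out.extend(x)' appends |x| copies of x
theorem pv_foldl_rep (x : List String) :
    ∀ (l acc : List String), l.foldl (fun a _ => a ++ x) acc = acc ++ (List.replicate l.length x).flatten := by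
  intro l
  induction l with
  | nil => intro acc; simp
  | cons h t ih =>
      intro acc
      simp only [List.foldl_cons, ih, List.length_cons, List.replicate_succ, List.flatten_cons,
        List.append_assoc]

theorem pv_update_subset (s : PySem.Set String) (xs : List String) (h : ∀ a ∈ xs, a ∈ s) :
    PySem.Set.update s xs = s := by
  rw [PySem.Set.update_eq_append_filter]
  have : (PySem.Set.ofList xs).filter (fun y => !(PySem.Set.contains s y)) = [] := by
    rw [List.filter_eq_nil_iff]
    intro a ha
    have hmem : a ∈ s := h a ((PySem.Set.mem_ofList xs a).mp ha)
    simpa using hmem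
  rw [this, List.append_nil]

theorem pv_update_rep (x : List String) (s : PySem.Set String) :
    ∀ n : Nat, PySem.Set.update s ((List.replicate (n + 1) x).flatten) = PySem.Set.update s x := by
  intro n
  induction n generalizing s with
  | zero => simp
  | succ m ih =>
      rw [List.replicate_succ, List.flatten_cons, PySem.Set.update_append, ih]
      exact pv_update_subset _ _ (fun a ha => (PySem.Set.mem_update _ _ _).mpr (Or.inr ha))

theorem pv_update_flatten_rep (x : List String) (s : PySem.Set String) :
    PySem.Set.update s ((List.replicate x.length x).flatten) = PySem.Set.update s x := by
  cases x with
  | nil => simp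
  | cons h t => exact pv_update_rep (h :: t) s t.length

-- phase 1 of A builds exactly the running Set.update of the value lists
theorem pv_setA_eq (vals : List (List String)) :
    ∀ s0 : List String,
      PySem.Set.ofList (vals.foldl (fun acc x => x.foldl (fun a _y => a ++ x) acc) s0)
        = vals.foldl (fun t x => PySem.Set.update t x) (PySem.Set.ofList s0) := by
  induction vals with
  | nil => intro s0; rfl
  | cons v vs ih =>
      intro s0
      simp only [List.foldl_cons]
      rw [pv_foldl_rep v v s0, ih, PySem.Set.ofList_append, pv_update_flatten_rep]

theorem pv_mem_foldl_update_init (vals : List (List String)) :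
    ∀ (s0 : PySem.Set String) (x : String), x ∈ s0 →
      x ∈ vals.foldl (fun t v => PySem.Set.update t v) s0 := by
  induction vals with
  | nil => intro s0 x hx; exact hx
  | cons v vs ih =>
      intro s0 x hx
      exact ih _ x ((PySem.Set.mem_update _ _ _).mpr (Or.inl hx))

theorem pv_mem_foldl_update (vals : List (List String)) :
    ∀ (s0 : PySem.Set String) (v : List String) (x : String), v ∈ vals → x ∈ v →
      x ∈ vals.foldl (fun t v => PySem.Set.update t v) s0 := by
  induction vals with
  | nil => intro _ _ _ h; cases h
  | cons w ws ih =>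
      intro s0 v x hv hx
      rcases List.mem_cons.mp hv with rfl | hv'
      · exact pv_mem_foldl_update_init ws _ x ((PySem.Set.mem_update _ _ _).mpr (Or.inr hx))
      · exact ih _ v x hv' hx

-- one item (key k, value list val) of A's phase 2, with 'pre' the elements already holding k
theorem pv_phase2_one (s : List String) (hnd : s.Nodup) (k : String) :
    ∀ (val pre : List String) (dd : PySem.Dict String (List String)) (g : String → List String),
      (∀ x, k ∉ g x) →
      (∀ x ∈ val, x ∈ s) →
      dd.items = s.map (fun x => (x, g x ++ if x ∈ pre then [k] else [])) →
      (val.foldl (fun dd x =>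
          dd.insert x (dd.getD x [] ++ (if k ∈ dd.getD x [] then [] else [k]))) dd).items
        = s.map (fun x => (x, g x ++ if x ∈ pre ++ val then [k] else [])) := by
  intro val
  induction val with
  | nil =>
      intro pre dd g hk hsub hitems
      simp only [List.foldl_nil, List.append_nil]
      exact hitems
  | cons x0 rest ih =>
      intro pre dd g hk hsub hitems
      have hx0s : x0 ∈ s := hsub x0 (List.mem_cons_self)
      have hkeys : dd.keys = s := by
        simp only [PySem.Dict.keys, hitems, List.map_map]
        rw [List.map_congr_left (fun x _ => rfl :
          ∀ x ∈ s, ((fun (p : String × List String) => p.1) ∘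
            fun x => (x, g x ++ if x ∈ pre then [k] else [])) x = id x)]
        exact List.map_id s
      have hkeysnd : dd.keys.Nodup := by rw [hkeys]; exact hnd
      have hmem : (x0, g x0 ++ if x0 ∈ pre then [k] else []) ∈ dd.items := by
        rw [hitems]; exact List.mem_map_of_mem hx0s
      have hget : dd.getD x0 [] = g x0 ++ if x0 ∈ pre then [k] else [] :=
        PySem.Dict.getD_of_mem_items dd hmem hkeysnd []
      have hcont : dd.contains x0 = true :=
        (PySem.Dict.contains_iff_mem_keys dd x0).mpr (by rw [hkeys]; exact hx0s)
      have hnv : dd.getD x0 [] ++ (if k ∈ dd.getD x0 [] then [] else [k]) = g x0 ++ [k] := by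
        rw [hget]
        by_cases hp : x0 ∈ pre
        · simp [hp]
        · simp [hp, hk x0]
      have hitems' :
          (dd.insert x0 (dd.getD x0 [] ++ (if k ∈ dd.getD x0 [] then [] else [k]))).items
            = s.map (fun x => (x, g x ++ if x ∈ pre ++ [x0] then [k] else [])) := by
        rw [PySem.Dict.items_insert_of_contains dd _ hcont, hnv, hitems, List.map_map]
        refine List.map_congr_left ?_
        intro x hx
        by_cases hxx : x = x0
        · subst hxx
          simp [List.mem_append]
        · have : (x == x0) = false := by simp [hxx]
          simp only [Function.comp_apply, this, Bool.false_eq_true, if_false]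
          have : (x ∈ pre ++ [x0]) ↔ (x ∈ pre) := by
            simp [List.mem_append, hxx]
          simp [this]
      have := ih (pre ++ [x0]) _ g hk (fun x hx => hsub x (List.mem_cons_of_mem _ hx)) hitems'
      rw [List.foldl_cons, this]
      simp [List.append_assoc]

-- all of A's phase 2: each element's list accumulates the keys whose value list contains it
theorem pv_phase2_all (s : List String) (hnd : s.Nodup) :
    ∀ (l2 : List (String × List String)) (dd : PySem.Dict String (List String))
      (g : String → List String),
      dd.items = s.map (fun x => (x, g x)) →
      (∀ x, ∀ kv ∈ l2, kv.1 ∉ g x) →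
      (∀ kv ∈ l2, ∀ x ∈ kv.2, x ∈ s) →
      (l2.map (·.1)).Nodup →
      (l2.foldl (fun dd kv =>
          kv.2.foldl (fun dd x =>
            dd.insert x (dd.getD x [] ++ (if kv.1 ∈ dd.getD x [] then [] else [kv.1]))) dd) dd).items
        = s.map (fun x => (x, g x ++ (l2.filter (fun kv => decide (x ∈ kv.2))).map (·.1))) := by
  intro l2
  induction l2 with
  | nil =>
      intro dd g hitems _ _ _
      simpa using hitems
  | cons kv rest ih =>
      intro dd g hitems hfresh hsub hnodup
      have hitems0 : dd.items = s.map (fun x => (x, g x ++ if x ∈ ([] : List String) then [kv.1] else [])) := by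
        simpa using hitems
      have h1 := pv_phase2_one s hnd kv.1 kv.2 [] dd g
        (fun x => hfresh x kv List.mem_cons_self)
        (hsub kv List.mem_cons_self) hitems0
      have h2 := ih _ (fun x => g x ++ if x ∈ kv.2 then [kv.1] else [])
        (by simpa using h1)
        (by
          intro x kv' hkv'
          have ha : kv'.1 ∉ g x := hfresh x kv' (List.mem_cons_of_mem _ hkv')
          have hb : kv'.1 ≠ kv.1 := by
            intro he
            have hm : kv'.1 ∈ rest.map (·.1) := List.mem_map_of_mem hkv'
            rw [List.map_cons] at hnodup
            exact (List.nodup_cons.mp hnodup).1 (he ▸ hm)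
          intro hmem
          rcases List.mem_append.mp hmem with hmm | hmm
          · exact ha hmm
          · by_cases hv : x ∈ kv.2
            · rw [if_pos hv] at hmm
              exact hb (List.mem_singleton.mp hmm)
            · rw [if_neg hv] at hmm
              simp at hmm)
        (fun kv' hkv' => hsub kv' (List.mem_cons_of_mem _ hkv'))
        (by rw [List.map_cons] at hnodup; exact (List.nodup_cons.mp hnodup).2)
      rw [List.foldl_cons, h2]
      refine List.map_congr_left ?_
      intro x hx
      by_cases hv : x ∈ kv.2
      · simp [hv, List.append_assoc]
      · simp [hv]

-- ===== VERDICT (by name: the statement is the Claim_ definition above) =====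
theorem reverse_dictionary_spec : Claim_equal_reverse_dictionary := by
  intro d _
  unfold Spec_reverse_dictionary reverse_dictionary reverse_dictionary_alt
  set dc := PySem.Dict.ofList d with hdc
  set l := dc.items with hl
  -- both "sets" are the running update over the value lists
  have hset : PySem.Set.ofList (dc.values.foldl (fun acc x => x.foldl (fun a _y => a ++ x) acc) [])
      = dc.values.foldl (fun t x => PySem.Set.update t x) ([] : PySem.Set String) :=
    pv_setA_eq dc.values []
  have horder : dc.values.foldl (fun s val => val.foldl (fun s x => PySem.Set.add s x) s)
      (PySem.Set.empty : PySem.Set String)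
      = dc.values.foldl (fun t x => PySem.Set.update t x) ([] : PySem.Set String) := rfl
  set t := dc.values.foldl (fun t x => PySem.Set.update t x) ([] : PySem.Set String) with ht
  have hndt : t.Nodup := by
    rw [← hset]; exact PySem.Set.nodup_ofList _
  have hkeysnd : (l.map (·.1)).Nodup := by
    have := PySem.Dict.nodup_keys_ofList (κ := String) (ν := List String) d
    simpa [PySem.Dict.keys, hdc, hl] using this
  have hsub : ∀ kv ∈ l, ∀ x ∈ kv.2, x ∈ t := by
    intro kv hkv x hx
    exact pv_mem_foldl_update dc.values [] kv.2 x (by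
      have : kv.2 ∈ l.map (·.2) := List.mem_map_of_mem hkv
      simpa [PySem.Dict.values, hl] using this) hx
  -- dict.fromkeys over the (nodup) set appends fresh entries
  have hfrom : ((PySem.Set.ofList (dc.values.foldl (fun acc x => x.foldl (fun a _y => a ++ x) acc) []) :
        PySem.Set String).foldl (fun dd x => dd.insert x ([] : List String)) PySem.Dict.empty).items
      = t.map (fun x => (x, ([] : List String))) := by
    rw [hset]
    have := PySem.Dict.items_foldl_insert_fresh (l := t) (k := fun a => a)
      (v := fun _ => ([] : List String)) (d := PySem.Dict.empty)
      (fun a _ => PySem.Dict.contains_empty a) (by simpa using hndt)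
    simpa using this
  have hmain := pv_phase2_all t hndt l _ (fun _ => ([] : List String)) hfrom
    (by intro x kv _ h; cases h) hsub hkeysnd
  simp only [hl] at hmain ⊢
  rw [hmain, horder]
  refine List.map_congr_left ?_
  intro x hx
  simp
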